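-- pv_equiv track=rewrite | github.com/DancingOnAir/LeetcodePythonSolution | array/1409_queries_on_a_permutation_with_key.py | processQueries1
-- ===== SOURCE A (Python) =====
-- from typing import List
--
-- def processQueries1(queries: List[int], m: int) -> List[int]:
--     res = []
--     for i, val in enumerate(queries):
--         pos = val - 1
--         greater = []
--         move_flag = False
--         for num in queries[:i]:
--             if not move_flag:
--                 if num > val and num not in greater:
--                     pos += 1
--                     greater.append(num)
--                 elif num == val:
--                     pos = 0
--                     move_flag = True
--                     greater = []
--             elif num == val:
--                 pos = 0
--                 greater = []
--             else:
--                 if num not in greater: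
--                     pos += 1
--                     greater.append(num)
--
--         res.append(pos)
--     return res
-- ===== SOURCE B (Python) =====
-- def processQueries1(queries, m):
--     # One pass with a move-to-front list of distinct previously queried values,
--     # most recent first; no rescans of the query prefix.
--     res = []
--     front = []
--     for val in queries:
--         if val in front:
--             pos = front.index(val)
--             front.remove(val)
--         else:
--             pos = (val - 1) + sum(1 for x in front if x > val)
--         front.insert(0, val)
--         res.append(pos)
--     return res
-- ===== Notes on version B (the rewrite author's own statement) =====
-- stated objective: faster
-- what changed: B replaces A's per-query rescan of the whole prefix (itself doing linear membership scans of the `greater` list) by a single pass that maintains a move-to-front list of the distinct previously queried values and reads each answer off that list.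
import Mathlib
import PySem

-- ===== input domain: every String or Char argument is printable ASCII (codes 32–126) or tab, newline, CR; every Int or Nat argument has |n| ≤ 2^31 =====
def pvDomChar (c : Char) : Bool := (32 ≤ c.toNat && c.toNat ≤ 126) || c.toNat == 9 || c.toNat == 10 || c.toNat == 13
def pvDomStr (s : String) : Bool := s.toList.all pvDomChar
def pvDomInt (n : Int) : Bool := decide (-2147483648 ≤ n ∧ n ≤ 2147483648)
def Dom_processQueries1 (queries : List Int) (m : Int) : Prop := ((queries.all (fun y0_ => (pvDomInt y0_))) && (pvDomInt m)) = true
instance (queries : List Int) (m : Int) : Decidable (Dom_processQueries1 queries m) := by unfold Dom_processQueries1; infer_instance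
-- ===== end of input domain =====

-- B replaces A's per-query rescan of the whole prefix (with its inner `greater` membership scans)
-- by a single pass maintaining a move-to-front list of the distinct previously queried values.

-- ===== PORT A =====
-- inner loop body of A: state is (pos, greater, move_flag)
def pvInnerStep (val : Int) (st : Int × List Int × Bool) (num : Int) : Int × List Int × Bool :=
  if st.2.2 = false then
    if num > val ∧ ¬ st.2.1.contains num then (st.1 + 1, st.2.1 ++ [num], st.2.2)
    else if num = val then (0, [], true)
    else st
  else if num = val then (0, [], st.2.2)
  else if ¬ st.2.1.contains num then (st.1 + 1, st.2.1 ++ [num], st.2.2)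
  else st

def processQueries1 (queries : List Int) (m : Int) : List Int :=
  (PySem.List.enumerate queries).foldl
    (fun res iv =>
      let st := (PySem.List.slice queries none (some iv.1)).foldl (pvInnerStep iv.2) (iv.2 - 1, [], false)
      res ++ [st.1])
    []

-- ===== PORT B =====
-- loop body of B: state is (res, front)
def pvAltStep (acc : List Int × List Int) (val : Int) : List Int × List Int :=
  if acc.2.contains val then
    (acc.1 ++ [(((PySem.List.index? acc.2 val).getD 0 : Nat) : Int)], val :: acc.2.erase val)
  else
    (acc.1 ++ [(val - 1) + (acc.2.countP (fun x => val < x) : Int)], val :: acc.2)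

def processQueries1_alt (queries : List Int) (m : Int) : List Int :=
  (queries.foldl pvAltStep ([], [])).1

-- ===== PRECONDITION & SPEC =====
def Spec_processQueries1 (queries : List Int) (m : Int) (out : List Int) : Prop := out = processQueries1_alt queries m
instance (queries : List Int) (m : Int) (out : List Int) : Decidable (Spec_processQueries1 queries m out) := by unfold Spec_processQueries1; infer_instance

-- ===== CLAIM (what is proved, stated in full; the proofs are below) =====
def Claim_equal_processQueries1 : Prop := ∀ (queries : List Int) (m : Int), Dom_processQueries1 queries m → Spec_processQueries1 queries m (processQueries1 queries m)

-- ===== LEMMAS AND PROOFS =====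

-- move-to-front list of a prefix (B's `front` after processing it)
def pvMtf (p : List Int) : List Int := p.foldl (fun L v => v :: L.erase v) []
-- distinct elements of s in first-occurrence order (A's `greater` once move_flag is set)
def pvOd (s : List Int) : List Int := s.foldl (fun g x => if g.contains x then g else g ++ [x]) []
-- distinct elements of p greater than v, first-occurrence order (A's `greater` before move_flag)
def pvGd (p : List Int) (v : Int) : List Int :=
  p.foldl (fun g x => if v < x ∧ ¬ g.contains x then g ++ [x] else g) []
-- suffix of p after the last occurrence of v (none if v ∉ p)
def pvLastOcc (p : List Int) (v : Int) : Option (List Int) :=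
  p.foldl (fun s x => if x = v then some [] else s.map (· ++ [x])) none

-- B's per-element value as a function of the current front
def pvPos (L : List Int) (v : Int) : Int :=
  if L.contains v then (((PySem.List.index? L v).getD 0 : Nat) : Int)
  else (v - 1) + (L.countP (fun x => v < x) : Int)

-- A's per-element value as a function of the prefix
def pvAPos (p : List Int) (v : Int) : Int :=
  (p.foldl (pvInnerStep v) (v - 1, [], false)).1

-- B's output values, element by element
def pvGo : List Int → List Int → List Int
  | [], _ => []
  | v :: t, L => pvPos L v :: pvGo t (v :: L.erase v)

theorem pvAltStep_eq (res L : List Int) (v : Int) :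
    pvAltStep (res, L) v = (res ++ [pvPos L v], v :: L.erase v) := by
  simp only [pvAltStep, pvPos]
  by_cases h : v ∈ L
  · simp [h]
  · simp [h, List.erase_of_not_mem h]

theorem pvAltFold (p : List Int) : ∀ res L,
    p.foldl pvAltStep (res, L) = (res ++ pvGo p L, p.foldl (fun L v => v :: L.erase v) L) := by
  induction p with
  | nil => intro res L; simp [pvGo]
  | cons v t ih =>
      intro res L
      simp only [List.foldl_cons, pvAltStep_eq, pvGo, ih, List.append_assoc, List.singleton_append]

theorem pvAlt_eq_go (q : List Int) (m : Int) : processQueries1_alt q m = pvGo q [] := by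
  simp [processQueries1_alt, pvAltFold]

theorem pvGo_snoc (x : Int) : ∀ (q L : List Int),
    pvGo (q ++ [x]) L = pvGo q L ++ [pvPos (q.foldl (fun L v => v :: L.erase v) L) x] := by
  intro q
  induction q with
  | nil => intro L; simp [pvGo]
  | cons v t ih => intro L; simp [pvGo, ih]

-- A's fold produces one output per enumerated element
theorem pvA_snoc (q : List Int) (x : Int) (m : Int) :
    processQueries1 (q ++ [x]) m = processQueries1 q m ++ [pvAPos q x] := by
  simp only [processQueries1, PySem.List.enumerate_append, List.foldl_append]
  have hcongr :
      (PySem.List.enumerate q).foldl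
        (fun res iv =>
          res ++ [((PySem.List.slice (q ++ [x]) none (some iv.1)).foldl (pvInnerStep iv.2) (iv.2 - 1, [], false)).1]) [] =
      (PySem.List.enumerate q).foldl
        (fun res iv =>
          res ++ [((PySem.List.slice q none (some iv.1)).foldl (pvInnerStep iv.2) (iv.2 - 1, [], false)).1]) [] := by
    apply PySem.List.foldl_congr_mem
    intro acc iv hiv
    rcases (PySem.List.mem_enumerate_iff _ _ _).1 hiv with ⟨k, hk, rfl⟩
    simp only [Int.zero_add, PySem.List.slice_to_natCast]
    rw [List.take_append_of_le_length (Nat.le_of_lt hk)]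
  rw [hcongr]
  simp only [PySem.List.enumerate, List.foldl_cons, List.foldl_nil]
  have : PySem.List.slice (q ++ [x]) none (some ((0 : Int) + q.length)) = q := by
    rw [Int.zero_add, PySem.List.slice_to_natCast, List.take_left]
  rw [this]
  rfl

-- membership and nodup facts for the fold shapes
theorem pvMtf_fold_mem (p : List Int) : ∀ (L : List Int) (a : Int),
    a ∈ p.foldl (fun L v => v :: L.erase v) L ↔ a ∈ p ∨ a ∈ L := by
  induction p with
  | nil => simp
  | cons v t ih =>
      intro L a
      have hmem : a ∈ v :: L.erase v ↔ a = v ∨ a ∈ L := by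
        by_cases hav : a = v
        · subst hav; simp
        · simp [hav, List.mem_erase_of_ne hav]
      rw [List.foldl_cons, ih, hmem, List.mem_cons]
      tauto

theorem pvMtf_fold_nodup (p : List Int) : ∀ (L : List Int), L.Nodup →
    (p.foldl (fun L v => v :: L.erase v) L).Nodup := by
  induction p with
  | nil => intro L h; simpa
  | cons v t ih =>
      intro L h
      rw [List.foldl_cons]
      exact ih _ (List.nodup_cons.2 ⟨h.not_mem_erase, h.erase v⟩)

theorem pvMtf_mem (p : List Int) (a : Int) : a ∈ pvMtf p ↔ a ∈ p := by
  rw [pvMtf, pvMtf_fold_mem]; simp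

theorem pvMtf_nodup (p : List Int) : (pvMtf p).Nodup := pvMtf_fold_nodup p [] List.nodup_nil

theorem pvOd_fold_mem (s : List Int) : ∀ (g : List Int) (a : Int),
    a ∈ s.foldl (fun g x => if g.contains x then g else g ++ [x]) g ↔ a ∈ s ∨ a ∈ g := by
  induction s with
  | nil => simp
  | cons x t ih =>
      intro g a
      rw [List.foldl_cons]
      by_cases hx : g.contains x
      · rw [if_pos hx, ih]
        constructor
        · rintro (h | h)
          · exact Or.inl (List.mem_cons_of_mem _ h)
          · exact Or.inr h
        · rintro (h | h)
          · rcases List.mem_cons.1 h with rfl | h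
            · exact Or.inr (by simpa using hx)
            · exact Or.inl h
          · exact Or.inr h
      · rw [if_neg hx, ih]
        simp [or_comm, or_assoc, or_left_comm]
  
theorem pvOd_fold_nodup (s : List Int) : ∀ (g : List Int), g.Nodup →
    (s.foldl (fun g x => if g.contains x then g else g ++ [x]) g).Nodup := by
  induction s with
  | nil => intro g h; simpa
  | cons x t ih =>
      intro g h
      rw [List.foldl_cons]
      by_cases hx : g.contains x
      · rw [if_pos hx]; exact ih _ h
      · rw [if_neg hx]
        refine ih _ ?_
        have : ∀ a ∈ g, ¬ a = x := by
          intro a ha hax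
          subst hax
          exact hx (by simpa using ha)
        simp only [List.nodup_append]
        exact ⟨h, List.nodup_singleton x, by simpa [List.disjoint_singleton] using this⟩

theorem pvOd_mem (s : List Int) (a : Int) : a ∈ pvOd s ↔ a ∈ s := by
  rw [pvOd, pvOd_fold_mem]; simp

theorem pvOd_nodup (s : List Int) : (pvOd s).Nodup := pvOd_fold_nodup s [] List.nodup_nil

theorem pvGd_fold_mem (v : Int) (p : List Int) : ∀ (g : List Int), (∀ b ∈ g, v < b) → ∀ (a : Int),
    (a ∈ p.foldl (fun g x => if v < x ∧ ¬ g.contains x then g ++ [x] else g) g ↔ (a ∈ p ∧ v < a) ∨ a ∈ g) := by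
  induction p with
  | nil => simp
  | cons x t ih =>
      intro g hg a
      rw [List.foldl_cons]
      by_cases hx : v < x ∧ ¬ g.contains x
      · rw [if_pos hx]
        rw [ih (g ++ [x]) (by intro b hb; rcases List.mem_append.1 hb with h | h
                              · exact hg b h
                              · simp at h; subst h; exact hx.1)]
        constructor
        · rintro (⟨h1, h2⟩ | h)
          · exact Or.inl ⟨List.mem_cons_of_mem _ h1, h2⟩
          · rcases List.mem_append.1 h with h | h
            · exact Or.inr h
            · simp at h; subst h; exact Or.inl ⟨List.mem_cons_self .., hx.1⟩
        · rintro (⟨h1, h2⟩ | h)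
          · rcases List.mem_cons.1 h1 with rfl | h1
            · exact Or.inr (List.mem_append.2 (Or.inr (by simp)))
            · exact Or.inl ⟨h1, h2⟩
          · exact Or.inr (List.mem_append.2 (Or.inl h))
      · rw [if_neg hx, ih g hg]
        constructor
        · rintro (⟨h1, h2⟩ | h)
          · exact Or.inl ⟨List.mem_cons_of_mem _ h1, h2⟩
          · exact Or.inr h
        · rintro (⟨h1, h2⟩ | h)
          · rcases List.mem_cons.1 h1 with rfl | h1
            · rcases not_and_or.1 hx with h | h
              · exact absurd h2 h
              · exact Or.inr (by simpa using not_not.1 h)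
            · exact Or.inl ⟨h1, h2⟩
          · exact Or.inr h

theorem pvGd_fold_nodup (v : Int) (p : List Int) : ∀ (g : List Int), g.Nodup →
    (p.foldl (fun g x => if v < x ∧ ¬ g.contains x then g ++ [x] else g) g).Nodup := by
  induction p with
  | nil => intro g h; simpa
  | cons x t ih =>
      intro g h
      rw [List.foldl_cons]
      by_cases hx : v < x ∧ ¬ g.contains x
      · rw [if_pos hx]
        refine ih _ ?_
        have : ∀ a ∈ g, ¬ a = x := by
          intro a ha hax
          subst hax
          exact hx.2 (by simpa using ha)
        simp only [List.nodup_append]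
        exact ⟨h, List.nodup_singleton x, by simpa [List.disjoint_singleton] using this⟩
      · rw [if_neg hx]; exact ih g h

theorem pvGd_mem (p : List Int) (v a : Int) : a ∈ pvGd p v ↔ a ∈ p ∧ v < a := by
  rw [pvGd, pvGd_fold_mem v p [] (by simp)]; simp

theorem pvGd_nodup (p : List Int) (v : Int) : (pvGd p v).Nodup :=
  pvGd_fold_nodup v p [] List.nodup_nil

theorem pvLastOcc_snoc (p : List Int) (v x : Int) :
    pvLastOcc (p ++ [x]) v = if x = v then some [] else (pvLastOcc p v).map (· ++ [x]) := by
  simp [pvLastOcc, List.foldl_append]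

theorem pvLastOcc_none (v : Int) : ∀ (p : List Int), pvLastOcc p v = none ↔ v ∉ p := by
  intro p
  induction p using List.reverseRecOn with
  | nil => simp [pvLastOcc]
  | append_singleton q x ih =>
      rw [pvLastOcc_snoc]
      by_cases hx : x = v
      · simp [hx]
      · simp [hx, ih, Ne.symm hx]

theorem pvLen_eq_of_nodup {l₁ l₂ : List Int} (h₁ : l₁.Nodup) (h₂ : l₂.Nodup)
    (h : ∀ a, a ∈ l₁ ↔ a ∈ l₂) : l₁.length = l₂.length :=
  ((List.perm_ext_iff_of_nodup h₁ h₂).2 h).length_eq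

-- the full state of A's inner loop
theorem pvInnerInv (v : Int) : ∀ (p : List Int),
    p.foldl (pvInnerStep v) (v - 1, [], false) =
      match pvLastOcc p v with
      | none => (v - 1 + ((pvGd p v).length : Int), pvGd p v, false)
      | some s => (((pvOd s).length : Int), pvOd s, true) := by
  intro p
  induction p using List.reverseRecOn with
  | nil => simp [pvLastOcc, pvGd]
  | append_singleton q x ih =>
      rw [List.foldl_append, List.foldl_cons, List.foldl_nil, ih, pvLastOcc_snoc]
      have hgd : pvGd (q ++ [x]) v =
          if v < x ∧ ¬ (pvGd q v).contains x then pvGd q v ++ [x] else pvGd q v := by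
        simp [pvGd, List.foldl_append]
      cases hLO : pvLastOcc q v with
      | none =>
          by_cases hxv : x = v
          · subst hxv
            have h1 : ¬ (x > x ∧ ¬ (pvGd q x).contains x) := by simp
            simp [pvInnerStep, h1, pvOd]
          · by_cases hgt : v < x ∧ ¬ (pvGd q v).contains x
            · simp only [pvInnerStep, hxv, hgt]
              have hxg : x ∉ pvGd q v := by simpa using hgt.2
              simp [hgd, hgt, Prod.ext_iff, hxg]
              push_cast
              ring
            · simp only [pvInnerStep, hxv, hgt]
              simp [hgd, show ¬ (x > v ∧ ¬ (pvGd q v).contains x = true) from fun h => hgt ⟨h.1, h.2⟩]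
              have h2 : v < x → x ∈ pvGd q v := by
                intro hv
                by_contra hc
                exact hgt ⟨hv, by simpa using hc⟩
              have h1 : ¬ (v < x ∧ x ∉ pvGd q v) := fun h => h.2 (h2 h.1)
              exact ⟨by simp [h1], h2⟩
      | some s =>
          have hod : pvOd (s ++ [x]) = if (pvOd s).contains x then pvOd s else pvOd s ++ [x] := by
            simp [pvOd, List.foldl_append]
          by_cases hxv : x = v
          · subst hxv
            simp [pvInnerStep, pvOd]
          · by_cases hmem : (pvOd s).contains x
            · simp only [pvInnerStep, hxv, hmem]
              have hx1 : x ∈ pvOd s := by simpa using hmem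
              simp [hod, hx1]
            · simp only [pvInnerStep, hxv, hmem]
              have hx2 : x ∉ pvOd s := by simpa using hmem
              simp [hod, hx2]

-- structure of the move-to-front list around the last occurrence of v
theorem pvMtf_snoc (p : List Int) (x : Int) : pvMtf (p ++ [x]) = x :: (pvMtf p).erase x := by
  simp [pvMtf, List.foldl_append]

theorem pvMtf_split (v : Int) : ∀ (p s : List Int), pvLastOcc p v = some s →
    ∃ t, pvMtf p = pvMtf s ++ v :: t ∧ v ∉ pvMtf s := by
  intro p
  induction p using List.reverseRecOn with
  | nil => intro s h; simp [pvLastOcc] at h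
  | append_singleton q x ih =>
      intro s h
      rw [pvLastOcc_snoc] at h
      by_cases hxv : x = v
      · subst hxv
        rw [if_pos rfl] at h
        cases h
        refine ⟨(pvMtf q).erase x, ?_, by simp [pvMtf]⟩
        rw [pvMtf_snoc]
        simp [pvMtf]
      · rw [if_neg hxv] at h
        cases hLO : pvLastOcc q v with
        | none => rw [hLO] at h; simp at h
        | some s₀ =>
            rw [hLO] at h
            simp only [Option.map_some, Option.some.injEq] at h
            subst h
            rcases ih s₀ hLO with ⟨t, hq, hvnot⟩
            rw [pvMtf_snoc, hq]
            by_cases hx : x ∈ pvMtf s₀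
            · rw [List.erase_append_left _ hx]
              exact ⟨t, by rw [pvMtf_snoc]; simp, by
                simp only [pvMtf_snoc]
                intro hv
                rcases List.mem_cons.1 hv with hv | hv
                · exact hxv (hv.symm)
                · exact hvnot (List.mem_of_mem_erase hv)⟩
            · rw [List.erase_append_right _ hx]
              rw [List.erase_cons_tail (by simp [Ne.symm hxv])]
              refine ⟨t.erase x, ?_, ?_⟩
              · rw [pvMtf_snoc, List.erase_of_not_mem hx]
                simp
              · rw [pvMtf_snoc, List.erase_of_not_mem hx]
                intro hv
                rcases List.mem_cons.1 hv with hv | hv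
                · exact hxv (hv.symm)
                · exact hvnot hv

-- count bridge: v not yet queried
theorem pvCount_bridge (p : List Int) (v : Int) :
    ((pvMtf p).countP (fun x => decide (v < x)) : Int) = ((pvGd p v).length : Int) := by
  rw [List.countP_eq_length_filter]
  congr 1
  apply pvLen_eq_of_nodup ((pvMtf_nodup p).filter _) (pvGd_nodup p v)
  intro a
  simp [List.mem_filter, pvMtf_mem, pvGd_mem]

-- index bridge: v queried before, s the suffix after its last occurrence
theorem pvIndex_bridge (p s : List Int) (v : Int) (h : pvLastOcc p v = some s) :
    PySem.List.index? (pvMtf p) v = some (pvOd s).length := by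
  rcases pvMtf_split v p s h with ⟨t, hp, hvnot⟩
  have hlen : (pvMtf s).length = (pvOd s).length :=
    pvLen_eq_of_nodup (pvMtf_nodup s) (pvOd_nodup s) (by intro a; rw [pvMtf_mem, pvOd_mem])
  rw [hp, ← hlen]
  exact (PySem.List.index?_eq_some_iff _ _ _).2 ⟨pvMtf s, t, rfl, rfl, hvnot⟩

-- the heart: A's per-element value equals B's
theorem pvCore (p : List Int) (v : Int) : pvAPos p v = pvPos (pvMtf p) v := by
  rw [pvAPos, pvInnerInv]
  cases hLO : pvLastOcc p v with
  | none =>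
      have hnot : v ∉ p := (pvLastOcc_none v p).1 hLO
      rw [pvPos, if_neg (by simpa [pvMtf_mem] using hnot)]
      simp only []
      rw [← pvCount_bridge]
  | some s =>
      have hmem : v ∈ p := by
        by_contra hc
        rw [(pvLastOcc_none v p).2 hc] at hLO
        simp at hLO
      rw [pvPos, if_pos (by simpa [pvMtf_mem] using hmem)]
      rw [pvIndex_bridge p s v hLO]
      rfl

theorem pvAB (q : List Int) (m : Int) : processQueries1 q m = pvGo q [] := by
  induction q using List.reverseRecOn with
  | nil => simp [processQueries1, PySem.List.enumerate, pvGo]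
  | append_singleton q x ih =>
      rw [pvA_snoc, pvGo_snoc, ih]
      rw [pvCore, pvMtf]

-- ===== VERDICT (by name: the statement is the Claim_ definition above) =====
theorem processQueries1_spec : Claim_equal_processQueries1 := by
  intro queries m _
  unfold Spec_processQueries1
  rw [pvAlt_eq_go, pvAB]
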